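-- pv_equiv track=rewrite | github.com/Albertree/SOAR-ARC-test | procedural_memory/base_rules/_primitives.py | fill_between_separators
-- ===== SOURCE A (Python) =====
-- def fill_between_separators(grid, bg=7):
--     """Fill rows with nearest horizontal separator color.
--     Finds a vertical column (constant non-bg color with intersection markers)
--     and horizontal separator rows. Each non-separator row is colored by its
--     nearest separator. Equidistant rows between different-colored separators
--     become all intersection-color. Separator rows become all intersection-color
--     with the column color at the intersection."""
--     h = len(grid)
--     w = len(grid[0]) if grid else 0
--     if h == 0 or w == 0:
--         return [row[:] for row in grid]
--
--     # Find the vertical column with exactly 2 non-bg colors (most non-bg cells wins)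
--     col_idx = None
--     col_color = None
--     inter_color = None
--     best_count = 0
--     for c in range(w):
--         colors = {}
--         for r in range(h):
--             v = grid[r][c]
--             if v != bg:
--                 colors[v] = colors.get(v, 0) + 1
--         if len(colors) == 2:
--             total = sum(colors.values())
--             if total > best_count:
--                 sorted_colors = sorted(colors.items(), key=lambda x: -x[1])
--                 col_idx = c
--                 col_color = sorted_colors[0][0]
--                 inter_color = sorted_colors[1][0]
--                 best_count = total
--
--     if col_idx is None:
--         return [row[:] for row in grid]
--
--     # Find separator rows (where column cell = inter_color)
--     separators = []
--     for r in range(h):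
--         if grid[r][col_idx] == inter_color:
--             sep_color = None
--             for c in range(w):
--                 if c != col_idx and grid[r][c] != bg:
--                     sep_color = grid[r][c]
--                     break
--             if sep_color is not None:
--                 separators.append((r, sep_color))
--
--     if not separators:
--         return [row[:] for row in grid]
--
--     # Build output
--     output = [[0] * w for _ in range(h)]
--     for r in range(h):
--         # Check if separator row
--         is_sep = False
--         for sr, sc in separators:
--             if sr == r:
--                 is_sep = True
--                 for c in range(w):
--                     output[r][c] = inter_color
--                 output[r][col_idx] = col_color
--                 break
--
--         if not is_sep:
--             # Find nearest separator above and below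
--             dist_above, color_above = h + 1, None
--             dist_below, color_below = h + 1, None
--             for sr, sc in separators:
--                 d = abs(r - sr)
--                 if sr < r and d < dist_above:
--                     dist_above, color_above = d, sc
--                 elif sr > r and d < dist_below:
--                     dist_below, color_below = d, sc
--
--             if color_above is None:
--                 fill = color_below
--             elif color_below is None:
--                 fill = color_above
--             elif dist_above < dist_below:
--                 fill = color_above
--             elif dist_below < dist_above:
--                 fill = color_below
--             elif color_above == color_below:
--                 fill = color_above
--             else:
--                 fill = inter_color  # equidistant, different colors
--
--             for c in range(w):
--                 output[r][c] = fill
--             output[r][col_idx] = inter_color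
--
--     return output
-- ===== SOURCE B (Python) =====
-- def fill_between_separators(grid, bg=7):
--     """Segment-based rewrite: pick the marker column from the transposed grid by
--     ordered dedup + count, list the separator rows once, then emit the output
--     segment by segment between consecutive separators instead of searching the
--     nearest separator for every row."""
--     h = len(grid)
--     w = len(grid[0]) if grid else 0
--     if h == 0 or w == 0:
--         return [row[:] for row in grid]
--
--     best = None  # (total, col, col_color, inter_color)
--     for c, col in enumerate(zip(*grid)):
--         vals = [v for v in col if v != bg]
--         distinct = []
--         for v in vals:
--             if v not in distinct:
--                 distinct.append(v)
--         if len(distinct) == 2 and (best is None or len(vals) > best[0]):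
--             a, b = distinct
--             if vals.count(b) > vals.count(a):
--                 a, b = b, a
--             best = (len(vals), c, a, b)
--     if best is None:
--         return [row[:] for row in grid]
--     _, ci, colc, inter = best
--
--     seps = []
--     for r, row in enumerate(grid):
--         if row[ci] == inter:
--             hits = [v for c, v in enumerate(row[:w]) if c != ci and v != bg]
--             if hits:
--                 seps.append((r, hits[0]))
--     if not seps:
--         return [row[:] for row in grid]
--
--     def pick(r, pa, pb):
--         if pa is None:
--             return pb[1]
--         if pb is None:
--             return pa[1]
--         if r - pa[0] < pb[0] - r:
--             return pa[1]
--         if pb[0] - r < r - pa[0]: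
--             return pb[1]
--         if pa[1] == pb[1]:
--             return pa[1]
--         return inter
--
--     def plain(fill):
--         line = [fill] * w
--         line[ci] = inter
--         return line
--
--     def segment(lo, hi, pa, pb):
--         return [plain(pick(r, pa, pb)) for r in range(lo, hi)]
--
--     nexts = list(seps[1:]) + [None]
--     out = segment(0, seps[0][0], None, seps[0])
--     for cur, nxt in zip(seps, nexts):
--         line = [inter] * w
--         line[ci] = colc
--         out.append(line)
--         out.extend(segment(cur[0] + 1, nxt[0] if nxt else h, cur, nxt))
--     return out
-- ===== Notes on version B (the rewrite author's own statement) =====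
-- stated objective: alternative
-- what changed: B picks the marker column by ordered dedup + count over the transposed grid, collects the separator rows once, and then assembles the output segment by segment between consecutive separators (each gap filled from its two bounding separators) instead of rescanning the whole separator list for every row.
import Mathlib
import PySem

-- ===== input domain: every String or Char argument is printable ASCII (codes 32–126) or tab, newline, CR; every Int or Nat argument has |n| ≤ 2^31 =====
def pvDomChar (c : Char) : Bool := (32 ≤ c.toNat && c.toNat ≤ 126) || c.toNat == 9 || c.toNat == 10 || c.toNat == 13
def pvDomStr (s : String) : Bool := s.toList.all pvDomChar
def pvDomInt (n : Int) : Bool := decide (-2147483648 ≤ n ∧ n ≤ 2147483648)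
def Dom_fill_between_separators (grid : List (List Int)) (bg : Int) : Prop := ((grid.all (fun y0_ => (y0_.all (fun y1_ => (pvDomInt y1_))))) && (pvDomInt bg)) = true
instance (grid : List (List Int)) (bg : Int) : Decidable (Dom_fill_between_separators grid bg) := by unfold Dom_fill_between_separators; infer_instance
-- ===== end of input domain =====

-- B picks the marker column by dedup+count over the transposed grid, lists the
-- separator rows once, and assembles the output segment by segment between
-- consecutive separators instead of rescanning the separator list per row.

-- ===== PORT A =====
-- Literal port of Source A; each Python loop body is a named helper.  Notes:
-- * the 'for sr, sc in separators: if sr == r: … break' loop only tests membership and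
--   fills the row once, so it is ported as 'any' + the one-time fill;
-- * the row mutations 'output[r][c] = …' read output[r], fold the column writes over
--   it, and write the row back once (same cells, same values);
-- * the inner 'break' loop looking for the first non-bg cell is a fold whose state
--   sticks at the first 'some'.

def pvA_copy (grid : List (List Int)) : List (List Int) :=
  grid.map (fun row => PySem.List.slice row none none)

def pvA_colStep (grid : List (List Int)) (bg h : Int)
    (st : Option (Int × Int × Int) × Int) (c : Int) : Option (Int × Int × Int) × Int :=
  let colors := (PySem.List.pyRange 0 h 1).foldl (fun (colors : PySem.Dict Int Int) r =>
    let v := PySem.List.pyGetD (PySem.List.pyGetD grid r []) c 0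
    if v ≠ bg then colors.insert v (colors.getD v 0 + 1) else colors) PySem.Dict.empty
  if colors.size = 2 then
    let total := colors.values.sum
    if total > st.2 then
      let sorted_colors := PySem.List.sorted colors.items (fun x => -x.2)
      (some (c, (PySem.List.pyGetD sorted_colors 0 (0, 0)).1,
                (PySem.List.pyGetD sorted_colors 1 (0, 0)).1), total)
    else st
  else st

def pvA_firstColor (grid : List (List Int)) (bg ci w r : Int) : Option Int :=
  (PySem.List.pyRange 0 w 1).foldl (fun (sc : Option Int) c =>
    match sc with
    | some _ => sc
    | none =>
      if c ≠ ci ∧ PySem.List.pyGetD (PySem.List.pyGetD grid r []) c 0 ≠ bg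
      then some (PySem.List.pyGetD (PySem.List.pyGetD grid r []) c 0) else none) none

def pvA_sepStep (grid : List (List Int)) (bg ci inter w : Int)
    (seps : List (Int × Int)) (r : Int) : List (Int × Int) :=
  if PySem.List.pyGetD (PySem.List.pyGetD grid r []) ci 0 = inter then
    match pvA_firstColor grid bg ci w r with
    | some v => seps ++ [(r, v)]
    | none => seps
  else seps

def pvA_scanStep (r : Int) (st : (Int × Option Int) × (Int × Option Int))
    (p : Int × Int) : (Int × Option Int) × (Int × Option Int) :=
  let d := |r - p.1|
  if p.1 < r ∧ d < st.1.1 then ((d, some p.2), st.2)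
  else if p.1 > r ∧ d < st.2.1 then (st.1, (d, some p.2))
  else st

def pvA_rowStep (separators : List (Int × Int)) (h w ci colc inter : Int)
    (output : List (List Int)) (r : Int) : List (List Int) :=
  let is_sep := separators.any (fun p => p.1 == r)
  if is_sep then
    let row := (PySem.List.pyRange 0 w 1).foldl
      (fun row c => PySem.List.pySetD row c inter) (PySem.List.pyGetD output r [])
    PySem.List.pySetD output r (PySem.List.pySetD row ci colc)
  else
    let scan := separators.foldl (pvA_scanStep r) ((h + 1, none), (h + 1, none))
    let fill : Int := match scan.1.2, scan.2.2 with
      | none, none => 0      -- unreachable: separators ≠ [] and r is not a separator row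
      | none, some cb => cb
      | some ca, none => ca
      | some ca, some cb =>
        if scan.1.1 < scan.2.1 then ca
        else if scan.2.1 < scan.1.1 then cb
        else if ca = cb then ca
        else inter
    let row := (PySem.List.pyRange 0 w 1).foldl
      (fun row c => PySem.List.pySetD row c fill) (PySem.List.pyGetD output r [])
    PySem.List.pySetD output r (PySem.List.pySetD row ci inter)

def fill_between_separators (grid : List (List Int)) (bg : Int) : List (List Int) :=
  let h : Int := PySem.List.len grid
  let w : Int := if grid.isEmpty then 0 else PySem.List.len (PySem.List.pyGetD grid 0 [])
  if h = 0 ∨ w = 0 then pvA_copy grid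
  else
    let st := (PySem.List.pyRange 0 w 1).foldl (pvA_colStep grid bg h) (none, 0)
    match st.1 with
    | none => pvA_copy grid
    | some (ci, colc, inter) =>
      let separators := (PySem.List.pyRange 0 h 1).foldl (pvA_sepStep grid bg ci inter w) []
      if separators.isEmpty then pvA_copy grid
      else
        (PySem.List.pyRange 0 h 1).foldl (pvA_rowStep separators h w ci colc inter)
          ((PySem.List.pyRange 0 h 1).map (fun _ => PySem.List.pyRepeat [0] w))

-- ===== PORT B =====
-- Literal port of Source B.  zip(*grid) is the structural column-peeling recursion
-- pvB_zip (stop as soon as some row is exhausted, exactly as zip does); the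
-- membership-test dedup loop over a column's values is PySem.Set.ofList; the
-- list comprehensions become List.map / List.filter; the assembly loop over
-- zip(seps, nexts) is a fold that appends the separator line and the following
-- segment.

lemma pvB_zip_measure_le (rows : List (List Int)) :
    ((rows.map List.tail).map List.length).sum ≤ (rows.map List.length).sum := by
  induction rows with
  | nil => simp
  | cons x t ih =>
    have : x.tail.length ≤ x.length := by cases x <;> simp
    simp only [List.map_cons, List.sum_cons]
    omega

lemma pvB_zip_measure (rows : List (List Int)) (h1 : rows.isEmpty = false)
    (h2 : rows.any (fun r => r.isEmpty) = false) :
    ((rows.map List.tail).map List.length).sum < (rows.map List.length).sum := by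
  cases rows with
  | nil => simp at h1
  | cons x t =>
    simp only [List.any_cons, Bool.or_eq_false_iff] at h2
    have hx : x ≠ [] := by simpa [List.isEmpty_iff] using h2.1
    have hxl : x.tail.length < x.length := by
      cases x with
      | nil => exact absurd rfl hx
      | cons a as => simp
    have := pvB_zip_measure_le t
    simp only [List.map_cons, List.sum_cons]
    omega

def pvB_zip (rows : List (List Int)) : List (List Int) :=
  if rows.isEmpty || rows.any (fun r => r.isEmpty) then []
  else rows.map (fun r => r.headD 0) :: pvB_zip (rows.map (fun r => r.tail))
termination_by (rows.map List.length).sum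
decreasing_by
  rename_i hguard
  simp only [Bool.or_eq_true, not_or, Bool.not_eq_true] at hguard
  have := pvB_zip_measure rows hguard.1 hguard.2
  simpa using this

def pvB_colStep (bg : Int) (best : Option (Int × Int × Int × Int)) (p : Int × List Int) :
    Option (Int × Int × Int × Int) :=
  let vals := p.2.filter (fun v => v != bg)
  let distinct := PySem.Set.ofList vals   -- the 'if v not in distinct: append' loop
  if distinct.length = 2 ∧ (best = none ∨ (vals.length : Int) > (best.getD (0, 0, 0, 0)).1) then
    match distinct with
    | [a, b] =>
      if vals.count b > vals.count a then some ((vals.length : Int), p.1, b, a)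
      else some ((vals.length : Int), p.1, a, b)
    | _ => best  -- unreachable: distinct has exactly two elements here
  else best

def pvB_sepStep (bg w ci inter : Int) (seps : List (Int × Int)) (p : Int × List Int) :
    List (Int × Int) :=
  if PySem.List.pyGetD p.2 ci 0 = inter then
    let hits := ((PySem.List.enumerate (PySem.List.slice p.2 none (some w))).filter
      (fun q => q.1 != ci && q.2 != bg)).map (fun q => q.2)
    match hits with
    | v :: _ => seps ++ [(p.1, v)]
    | [] => seps
  else seps

def pvB_pick (inter r : Int) (pa pb : Option (Int × Int)) : Int :=
  match pa, pb with
  | none, none => 0  -- unreachable: Source B never calls pick with two missing neighbours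
  | none, some q => q.2
  | some p, none => p.2
  | some p, some q =>
    if r - p.1 < q.1 - r then p.2
    else if q.1 - r < r - p.1 then q.2
    else if p.2 = q.2 then p.2
    else inter

def pvB_plain (w ci inter fill : Int) : List Int :=
  PySem.List.pySetD (PySem.List.pyRepeat [fill] w) ci inter

def pvB_segment (w ci inter lo hi : Int) (pa pb : Option (Int × Int)) : List (List Int) :=
  (PySem.List.pyRange lo hi 1).map (fun r => pvB_plain w ci inter (pvB_pick inter r pa pb))

def pvB_emitStep (h w ci colc inter : Int) (out : List (List Int))
    (p : (Int × Int) × Option (Int × Int)) : List (List Int) :=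
  (out ++ [PySem.List.pySetD (PySem.List.pyRepeat [inter] w) ci colc])
    ++ pvB_segment w ci inter (p.1.1 + 1) (match p.2 with | some q => q.1 | none => h) (some p.1) p.2

def fill_between_separators_alt (grid : List (List Int)) (bg : Int) : List (List Int) :=
  let h : Int := PySem.List.len grid
  let w : Int := if grid.isEmpty then 0 else PySem.List.len (PySem.List.pyGetD grid 0 [])
  if h = 0 ∨ w = 0 then grid.map (fun row => PySem.List.slice row none none)
  else
    let best := (PySem.List.enumerate (pvB_zip grid)).foldl (pvB_colStep bg) none
    match best with
    | none => grid.map (fun row => PySem.List.slice row none none)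
    | some (_, ci, colc, inter) =>
      let seps := (PySem.List.enumerate grid).foldl (pvB_sepStep bg w ci inter) []
      match seps with
      | [] => grid.map (fun row => PySem.List.slice row none none)
      | s0 :: _ =>
        let nexts := (PySem.List.slice seps (some 1) none).map some ++ [none]
        let init := pvB_segment w ci inter 0 s0.1 none (some s0)
        (seps.zip nexts).foldl (pvB_emitStep h w ci colc inter) init

-- ===== PRECONDITION & SPEC =====
-- Pre_ excludes exactly the ragged grids on which the Python A raises IndexError
-- (a nonempty grid with a nonempty first row and some row shorter than the first).
def Pre_fill_between_separators (grid : List (List Int)) (bg : Int) : Prop :=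
  ∀ row ∈ grid, (grid.headD []).length ≤ row.length
instance (grid : List (List Int)) (bg : Int) : Decidable (Pre_fill_between_separators grid bg) := by
  unfold Pre_fill_between_separators; infer_instance

def pvWitness_fill_between_separators : List (List Int) × Int := ([[7, 1], [2, 3]], 7)

def Spec_fill_between_separators (grid : List (List Int)) (bg : Int) (out : List (List Int)) : Prop := out = fill_between_separators_alt grid bg
instance (grid : List (List Int)) (bg : Int) (out : List (List Int)) : Decidable (Spec_fill_between_separators grid bg out) := by unfold Spec_fill_between_separators; infer_instance

-- ===== CLAIM (what is proved, stated in full; the proofs are below) =====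
def Claim_equal_fill_between_separators : Prop := ∀ (grid : List (List Int)) (bg : Int), Dom_fill_between_separators grid bg → Pre_fill_between_separators grid bg → Spec_fill_between_separators grid bg (fill_between_separators grid bg)

-- ===== LEMMAS AND PROOFS =====

-- ---- shared small facts ----

lemma pv_map_range_getD {α β : Type} (l : List α) (f : α → β) (d : α) :
    (List.range l.length).map (fun k => f (l.getD k d)) = l.map f := by
  apply List.ext_getElem
  · simp
  · intro i h1 h2
    simp only [List.length_map, List.length_range] at h1
    simp [List.getD_eq_getElem?_getD, List.getElem?_eq_getElem, h1]

lemma pv_count_sum (l : List Int) :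
    ((PySem.Set.ofList l).map (fun k => (l.count k : Int))).sum = (l.length : Int) := by
  have hperm : (PySem.Set.ofList l).Perm l.dedup := by
    apply (List.perm_ext_iff_of_nodup (PySem.Set.nodup_ofList l) l.nodup_dedup).mpr
    intro a
    rw [PySem.Set.mem_ofList, List.mem_dedup]
  rw [(hperm.map (fun k => (l.count k : Int))).sum_eq]
  have h2 : l.dedup.map (fun k => (l.count k : Int))
      = (l.dedup.map (fun k => l.count k)).map (fun n : Nat => (n : Int)) := by
    simp [List.map_map]
  rw [h2, ← Nat.cast_list_sum]
  norm_cast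
  simpa using List.sum_map_count_dedup_eq_length l

lemma pv_sorted_pair (p q : Int × Int) :
    PySem.List.sorted [p, q] (fun x => -x.2) = if -q.2 < -p.2 then [q, p] else [p, q] := by
  simp [PySem.List.sorted_eq_foldl_insertBy, PySem.List.insertBy]

lemma pv_bne_filter (l : List Int) (bg : Int) :
    l.filter (fun v => decide (v ≠ bg)) = l.filter (fun v => v != bg) := by
  apply List.filter_congr
  intro v _
  by_cases h : v = bg <;> simp [h]

lemma pv_pyRange_nil (a b : Int) (hab : b ≤ a) : PySem.List.pyRange a b 1 = [] := by
  have h : ¬ a < b := by omega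
  simp [PySem.List.pyRange, h]

lemma pv_range_pairwise (n : Nat) :
    (PySem.List.pyRange 0 (n : Int) 1).Pairwise (· < ·) := by
  rw [PySem.List.pyRange_zero_natCast]
  apply List.Pairwise.map
  · intro a b hab
    exact_mod_cast hab
  · exact List.pairwise_lt_range

-- ---- phase 1: zip(*grid) and the two column folds ----

-- The column of a rectangular-enough grid, as both ports read it.
def pvColF (grid : List (List Int)) (c : Int) : List Int :=
  grid.map (fun row => PySem.List.pyGetD row c 0)

lemma pv_zip_eq (n : Nat) :
    ∀ (g : List (List Int)), g ≠ [] → (∀ row ∈ g, n ≤ row.length) →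
      (g.headD []).length = n →
      pvB_zip g = (List.range n).map (fun c => g.map (fun row => row.getD c 0)) := by
  induction n with
  | zero =>
    intro g hne _ hhd
    have hany : (g.isEmpty || g.any (fun r => r.isEmpty)) = true := by
      cases g with
      | nil => exact absurd rfl hne
      | cons x t =>
        simp only [List.headD_cons] at hhd
        simp [List.isEmpty_iff, List.length_eq_zero_iff.mp hhd]
    rw [pvB_zip, if_pos hany]
    simp
  | succ m ih =>
    intro g hne hlen hhd
    have hnonempty : ∀ row ∈ g, row ≠ [] := by
      intro row hr hnil
      have := hlen row hr
      simp [hnil] at this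
    have hguard : (g.isEmpty || g.any (fun r => r.isEmpty)) = false := by
      simp only [Bool.or_eq_false_iff, List.isEmpty_eq_false_iff, List.any_eq_false]
      exact ⟨hne, fun r hr => by simpa [List.isEmpty_iff] using hnonempty r hr⟩
    rw [pvB_zip, if_neg (by simp [hguard])]
    have hih := ih (g.map (fun r => r.tail))
      (by simpa using hne)
      (by
        intro row hrow
        rcases List.mem_map.mp hrow with ⟨r, hr, rfl⟩
        have := hlen r hr
        have : r.tail.length = r.length - 1 := by cases r <;> simp
        omega)
      (by
        cases g with
        | nil => exact absurd rfl hne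
        | cons x t =>
          simp only [List.headD_cons] at hhd
          simp only [List.map_cons, List.headD_cons]
          have : x.tail.length = x.length - 1 := by cases x <;> simp
          omega)
    rw [hih, List.range_succ_eq_map, List.map_cons]
    congr 1
    · apply List.map_congr_left
      intro row hrow
      cases row with
      | nil => exact absurd rfl (hnonempty [] hrow)
      | cons a as => simp
    · rw [List.map_map]
      apply List.map_congr_left
      intro c _
      simp only [Function.comp_apply, List.map_map]
      apply List.map_congr_left
      intro row _
      simp only [Function.comp_apply]
      cases row <;> simp

lemma pv_zip_eq_range (grid : List (List Int)) (hne : grid ≠ [])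
    (hpre : ∀ row ∈ grid, (grid.headD []).length ≤ row.length) :
    pvB_zip grid = (PySem.List.pyRange 0 ((grid.headD []).length : Int) 1).map (pvColF grid) := by
  rw [pv_zip_eq (grid.headD []).length grid hne hpre rfl,
    PySem.List.pyRange_zero_natCast, List.map_map]
  apply List.map_congr_left
  intro c _
  simp only [Function.comp_apply, pvColF]
  apply List.map_congr_left
  intro row _
  simp [PySem.List.pyGetD_natCast]

lemma pv_enumerate_map_pyRange {α : Type} [Inhabited α] (n : Nat) (F : Int → α) :
    PySem.List.enumerate ((PySem.List.pyRange 0 (n : Int) 1).map F) 0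
      = (PySem.List.pyRange 0 (n : Int) 1).map (fun j => (j, F j)) := by
  rw [PySem.List.enumerate_eq_map_pyRange _ default]
  have hlen : PySem.List.len ((PySem.List.pyRange 0 (n : Int) 1).map F) = (n : Int) := by
    rw [PySem.List.len_eq, List.length_map, PySem.List.length_pyRange_one]
    omega
  rw [hlen]
  apply List.map_congr_left
  intro j hj
  have hjr := PySem.List.mem_pyRange_one.mp hj
  rw [PySem.List.pyGetD_map_pyRange_of_nonneg F (n : Int) j default hjr.1 hjr.2]

-- the inner dict loop of A's column scan is Counter(non-bg values of the column)
lemma pv_colors_counter (grid : List (List Int)) (bg c : Int) :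
    (PySem.List.pyRange 0 ((grid.length : Int)) 1).foldl (fun (colors : PySem.Dict Int Int) r =>
        let v := PySem.List.pyGetD (PySem.List.pyGetD grid r []) c 0
        if v ≠ bg then colors.insert v (colors.getD v 0 + 1) else colors) PySem.Dict.empty
      = PySem.Dict.counter ((pvColF grid c).filter (fun v => v != bg)) := by
  have hmapr : (PySem.List.pyRange 0 (grid.length : Int) 1).map
        (fun r => PySem.List.pyGetD (PySem.List.pyGetD grid r []) c 0)
      = pvColF grid c := by
    rw [PySem.List.pyRange_zero_natCast, List.map_map]
    have hfn : ((fun r => PySem.List.pyGetD (PySem.List.pyGetD grid r []) c 0)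
          ∘ (fun k : Nat => (k : Int)))
        = fun k : Nat => (fun row => PySem.List.pyGetD row c 0) (grid.getD k []) := by
      funext k
      simp [Function.comp, PySem.List.pyGetD_natCast]
    rw [hfn]
    exact pv_map_range_getD grid (fun row => PySem.List.pyGetD row c 0) []
  calc (PySem.List.pyRange 0 (grid.length : Int) 1).foldl
        (fun (colors : PySem.Dict Int Int) r =>
          let v := PySem.List.pyGetD (PySem.List.pyGetD grid r []) c 0
          if v ≠ bg then colors.insert v (colors.getD v 0 + 1) else colors) PySem.Dict.empty
      = ((PySem.List.pyRange 0 (grid.length : Int) 1).map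
            (fun r => PySem.List.pyGetD (PySem.List.pyGetD grid r []) c 0)).foldl
          (fun (colors : PySem.Dict Int Int) v =>
            if v ≠ bg then colors.insert v (colors.getD v 0 + 1) else colors)
          PySem.Dict.empty :=
        (List.foldl_map
          (f := fun r => PySem.List.pyGetD (PySem.List.pyGetD grid r []) c 0)
          (g := fun (colors : PySem.Dict Int Int) v =>
            if v ≠ bg then colors.insert v (colors.getD v 0 + 1) else colors)).symm
    _ = (pvColF grid c).foldl
          (fun (colors : PySem.Dict Int Int) v =>
            if v ≠ bg then colors.insert v (colors.getD v 0 + 1) else colors)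
          PySem.Dict.empty := by rw [hmapr]
    _ = ((pvColF grid c).filter (fun v => decide (v ≠ bg))).foldl
          (fun (colors : PySem.Dict Int Int) v =>
            colors.insert v (colors.getD v 0 + 1)) PySem.Dict.empty :=
        PySem.List.foldl_ite_eq_foldl_filter _ _ _ _
    _ = PySem.Dict.counter ((pvColF grid c).filter (fun v => v != bg)) := by
        rw [pv_bne_filter, PySem.Dict.foldl_insert_getD_add_one_eq_counter]

def pvConv (s : Option (Int × Int × Int × Int)) : Option (Int × Int × Int) × Int :=
  match s with
  | none => (none, 0)
  | some (t, c, a, b) => (some (c, a, b), t)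

lemma pv_colStep_hom (grid : List (List Int)) (bg : Int)
    (s : Option (Int × Int × Int × Int)) (c : Int) :
    pvA_colStep grid bg (PySem.List.len grid) (pvConv s) c
      = pvConv (pvB_colStep bg s (c, pvColF grid c)) := by
  simp only [pvA_colStep, pvB_colStep, PySem.List.len_eq, pv_colors_counter]
  set vals := (pvColF grid c).filter (fun v => v != bg) with hvals
  have hsize : (PySem.Dict.counter vals).size = (PySem.Set.ofList vals).length := by
    simp only [PySem.Dict.size, PySem.Dict.items_counter, List.length_map]
  have hsum : (PySem.Dict.counter vals).values.sum = (vals.length : Int) := by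
    rw [PySem.Dict.values_eq_map_keys _ (PySem.Dict.nodup_keys_counter vals) 0,
      PySem.Dict.keys_counter]
    have hc : (PySem.Set.ofList vals).map (fun k => (PySem.Dict.counter vals).getD k 0)
        = (PySem.Set.ofList vals).map (fun k => (vals.count k : Int)) := by
      apply List.map_congr_left
      intro k _
      rw [PySem.Dict.getD_counter]
    rw [hc, pv_count_sum]
  rw [hsize, hsum]
  by_cases hlen : (PySem.Set.ofList vals).length = 2
  · obtain ⟨a, b, hab⟩ : ∃ a b, PySem.Set.ofList vals = [a, b] := by
      rcases hd : PySem.Set.ofList vals with _ | ⟨a, _ | ⟨b, _ | _⟩⟩ <;>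
        simp [hd] at hlen ⊢
    have hitems : (PySem.Dict.counter vals).items
        = [(a, (vals.count a : Int)), (b, (vals.count b : Int))] := by
      rw [PySem.Dict.items_counter, hab]
      rfl
    have hcc : ((vals.count a : Int)) + ((vals.count b : Int)) = (vals.length : Int) := by
      have hps := pv_count_sum vals
      rw [hab] at hps
      simpa using hps
    have hpos : 0 < vals.length := by
      rcases hv : vals with _ | _
      · rw [hv] at hab; simp [PySem.Set.ofList] at hab
      · simp [hv]
    rw [if_pos hlen]
    have hcond : ((PySem.Set.ofList vals).length = 2
        ∧ (s = none ∨ (vals.length : Int) > (s.getD (0, 0, 0, 0)).1))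
        ↔ ((vals.length : Int) > (pvConv s).2) := by
      cases s with
      | none => simp [pvConv, hlen, Int.natCast_pos, hpos]
      | some q =>
        obtain ⟨t, c', a', b'⟩ := q
        simp [pvConv, hlen]
    by_cases hnum : (vals.length : Int) > (pvConv s).2
    · rw [if_pos hnum, if_pos (hcond.mpr hnum), hab, hitems, pv_sorted_pair]
      by_cases hcmp : vals.count b > vals.count a
      · rw [if_pos (show -((vals.count b : Int)) < -((vals.count a : Int)) by
            push_cast; omega)]
        show (some (c, b, a), (vals.length : Int))
          = pvConv (if vals.count b > vals.count a
              then some ((vals.length : Int), c, b, a)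
              else some ((vals.length : Int), c, a, b))
        rw [if_pos hcmp]
        rfl
      · rw [if_neg (show ¬ (-((vals.count b : Int)) < -((vals.count a : Int))) by
            push_cast; omega)]
        show (some (c, a, b), (vals.length : Int))
          = pvConv (if vals.count b > vals.count a
              then some ((vals.length : Int), c, b, a)
              else some ((vals.length : Int), c, a, b))
        rw [if_neg hcmp]
        rfl
    · rw [if_neg hnum, if_neg (fun hcon => hnum (hcond.mp hcon))]
  · rw [if_neg hlen, if_neg (fun hcon => hlen hcon.1)]

-- ---- phase 2: the separator lists coincide ----

lemma pv_stick_some {α β : Type} (step : Option β → α → Option β)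
    (h1 : ∀ y x, step (some y) x = some y) (l : List α) (y : β) :
    l.foldl step (some y) = some y := by
  induction l with
  | nil => rfl
  | cons x t ih => rw [List.foldl_cons, h1]; exact ih

lemma pv_stick_head {α β : Type} (P : α → Prop) [DecidablePred P] (f : α → β)
    (step : Option β → α → Option β)
    (h1 : ∀ y x, step (some y) x = some y)
    (h2 : ∀ x, step none x = if P x then some (f x) else none) (l : List α) :
    l.foldl step none = ((l.filter (fun x => decide (P x))).map f).head? := by
  induction l with
  | nil => rfl
  | cons x t ih =>
    rw [List.foldl_cons, h2, List.filter_cons]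
    by_cases hx : P x
    · rw [if_pos hx, if_pos (by simpa using hx)]
      rw [pv_stick_some step h1 t (f x)]
      rfl
    · rw [if_neg hx, if_neg (by simpa using hx)]
      exact ih

lemma pv_hits_eq (grid : List (List Int)) (bg ci : Int) (w : Nat) (r : Int)
    (hrow : w ≤ (PySem.List.pyGetD grid r []).length) :
    (((PySem.List.enumerate (PySem.List.slice (PySem.List.pyGetD grid r []) none (some (w : Int)))).filter
        (fun q => q.1 != ci && q.2 != bg)).map (fun q => q.2)).head?
      = pvA_firstColor grid bg ci (w : Int) r := by
  set row := PySem.List.pyGetD grid r [] with hrowdef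
  have hslice : PySem.List.slice row none (some (w : Int)) = row.take w :=
    PySem.List.slice_to_natCast row w
  have htklen : (row.take w).length = w := by
    rw [List.length_take]
    omega
  have henum : PySem.List.enumerate (row.take w)
      = (PySem.List.pyRange 0 (w : Int) 1).map (fun j => (j, PySem.List.pyGetD (row.take w) j 0)) := by
    have := PySem.List.enumerate_eq_map_pyRange (row.take w) 0
    rwa [PySem.List.len_eq, htklen] at this
  rw [hslice, henum, List.filter_map, List.map_map, List.head?_map]
  have hR : pvA_firstColor grid bg ci (w : Int) r
      = Option.map (fun c => PySem.List.pyGetD row c 0)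
          ((PySem.List.pyRange 0 (w : Int) 1).filter
            (fun c => decide (c ≠ ci ∧ PySem.List.pyGetD row c 0 ≠ bg))).head? := by
    have h := pv_stick_head (fun c => c ≠ ci ∧ PySem.List.pyGetD row c 0 ≠ bg)
      (fun c => PySem.List.pyGetD row c 0)
      (fun (sc : Option Int) c =>
        match sc with
        | some _ => sc
        | none =>
          if c ≠ ci ∧ PySem.List.pyGetD (PySem.List.pyGetD grid r []) c 0 ≠ bg
          then some (PySem.List.pyGetD (PySem.List.pyGetD grid r []) c 0) else none)
      (fun y x => rfl) (fun x => rfl) (PySem.List.pyRange 0 (w : Int) 1)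
    rw [List.head?_map] at h
    exact h
  rw [hR]
  have hfil : (PySem.List.pyRange 0 (w : Int) 1).filter
        ((fun q : Int × Int => q.1 != ci && q.2 != bg) ∘ (fun j => (j, PySem.List.pyGetD (row.take w) j 0)))
      = (PySem.List.pyRange 0 (w : Int) 1).filter
        (fun c => decide (c ≠ ci ∧ PySem.List.pyGetD row c 0 ≠ bg)) := by
    apply List.filter_congr
    intro j hj
    have hjr := PySem.List.mem_pyRange_one.mp hj
    have hget : PySem.List.pyGetD (row.take w) j 0 = PySem.List.pyGetD row j 0 := by
      rw [PySem.List.pyGetD_eq_getElem (row.take w) 0 hjr.1 (by simp; push_cast at hjr ⊢; omega),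
        PySem.List.pyGetD_eq_getElem row 0 hjr.1 (by push_cast at hjr ⊢; omega)]
      exact List.getElem_take
    simp only [Function.comp_apply, hget]
    by_cases h1 : j = ci <;> by_cases h2 : PySem.List.pyGetD row j 0 = bg <;> simp [h1, h2]
  rw [hfil]
  cases hhd : ((PySem.List.pyRange 0 (w : Int) 1).filter
      (fun c => decide (c ≠ ci ∧ PySem.List.pyGetD row c 0 ≠ bg))).head? with
  | none => rfl
  | some j =>
    have hjmem : j ∈ (PySem.List.pyRange 0 (w : Int) 1).filter
        (fun c => decide (c ≠ ci ∧ PySem.List.pyGetD row c 0 ≠ bg)) :=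
      List.mem_of_mem_head? hhd
    have hjr := PySem.List.mem_pyRange_one.mp (List.mem_of_mem_filter hjmem)
    have hget : PySem.List.pyGetD (row.take w) j 0 = PySem.List.pyGetD row j 0 := by
      rw [PySem.List.pyGetD_eq_getElem (row.take w) 0 hjr.1 (by simp; push_cast at hjr ⊢; omega),
        PySem.List.pyGetD_eq_getElem row 0 hjr.1 (by push_cast at hjr ⊢; omega)]
      exact List.getElem_take
    simp [hget]

lemma pv_seps_eq (grid : List (List Int)) (bg ci inter : Int) (w : Nat)
    (hpre : ∀ row ∈ grid, w ≤ row.length) :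
    (PySem.List.enumerate grid).foldl (pvB_sepStep bg (w : Int) ci inter) []
      = (PySem.List.pyRange 0 ((grid.length : Int)) 1).foldl
          (pvA_sepStep grid bg ci inter (w : Int)) [] := by
  rw [show PySem.List.enumerate grid
      = (PySem.List.pyRange 0 ((grid.length : Int)) 1).map
          (fun r => (r, PySem.List.pyGetD grid r [])) by
    have := PySem.List.enumerate_eq_map_pyRange grid []
    rwa [PySem.List.len_eq] at this]
  rw [List.foldl_map]
  apply PySem.List.foldl_congr_mem
  intro seps r hr
  have hrr := PySem.List.mem_pyRange_one.mp hr
  simp only [pvB_sepStep, pvA_sepStep]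
  by_cases hcond : PySem.List.pyGetD (PySem.List.pyGetD grid r []) ci 0 = inter
  · rw [if_pos hcond, if_pos hcond]
    have hrowlen : w ≤ (PySem.List.pyGetD grid r []).length := by
      apply hpre
      refine PySem.List.pyGetD_mem grid [] ?_
      unfold PySem.Raise.InRange
      constructor <;> [skip; skip] <;> push_cast <;> omega
    have hh := pv_hits_eq grid bg ci w r hrowlen
    cases hfc : pvA_firstColor grid bg ci (w : Int) r with
    | none =>
      rw [hfc] at hh
      rw [List.head?_eq_none_iff.mp hh]
    | some v =>
      rw [hfc] at hh
      rw [show ((PySem.List.enumerate (PySem.List.slice (PySem.List.pyGetD grid r []) none (some (w : Int)))).filter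
          (fun q => q.1 != ci && q.2 != bg)).map (fun q => q.2)
        = v :: (((PySem.List.enumerate (PySem.List.slice (PySem.List.pyGetD grid r []) none (some (w : Int)))).filter
          (fun q => q.1 != ci && q.2 != bg)).map (fun q => q.2)).tail by
          rcases hl : ((PySem.List.enumerate (PySem.List.slice (PySem.List.pyGetD grid r []) none (some (w : Int)))).filter
              (fun q => q.1 != ci && q.2 != bg)).map (fun q => q.2) with _ | ⟨v', t'⟩
          · rw [hl] at hh; simp at hh
          · rw [hl] at hh
            simp only [List.head?_cons, Option.some.injEq] at hh
            rw [hl, hh]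
            simp]
  · rw [if_neg hcond, if_neg hcond]

lemma pv_sepA_filter (grid : List (List Int)) (bg ci inter w : Int) (rs : List Int) :
    rs.foldl (pvA_sepStep grid bg ci inter w) []
      = (rs.filter (fun r => (PySem.List.pyGetD (PySem.List.pyGetD grid r []) ci 0 == inter)
            && (pvA_firstColor grid bg ci w r).isSome)).map
          (fun r => (r, (pvA_firstColor grid bg ci w r).getD 0)) := by
  have hcong : ∀ (acc : List (Int × Int)), ∀ r ∈ rs,
      pvA_sepStep grid bg ci inter w acc r
        = (if ((PySem.List.pyGetD (PySem.List.pyGetD grid r []) ci 0 == inter)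
              && (pvA_firstColor grid bg ci w r).isSome) = true
           then acc ++ [(r, (pvA_firstColor grid bg ci w r).getD 0)] else acc) := by
    intro acc r _
    simp only [pvA_sepStep]
    by_cases h1 : PySem.List.pyGetD (PySem.List.pyGetD grid r []) ci 0 = inter
    · rw [if_pos h1]
      cases hfc : pvA_firstColor grid bg ci w r with
      | none => simp [h1, hfc]
      | some v => simp [h1, hfc]
    · rw [if_neg h1]
      simp [h1]
  rw [PySem.List.foldl_congr_mem rs _ _ [] hcong, PySem.List.foldl_append_if]
  simp

-- ---- phase 3: A's per-row scan of the separator list ----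

lemma pv_scanA (r : Int) (hh : Int) :
    ∀ (l : List (Int × Int)) (st : (Int × Option Int) × (Int × Option Int)),
      l.Pairwise (fun p q => p.1 < q.1) →
      (∀ p ∈ l, p.1 < r → |r - p.1| < st.1.1) →
      ((st.2.2 = none ∧ ∀ p ∈ l, r < p.1 → |r - p.1| < st.2.1) ∨
       (st.2.2 ≠ none ∧ ∀ p ∈ l, r < p.1 → ¬ (|r - p.1| < st.2.1))) →
      l.foldl (pvA_scanStep r) st =
        ((match (l.filter (fun p => decide (p.1 < r))).getLast? with
          | none => st.1
          | some p => (r - p.1, some p.2)),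
         (match st.2.2 with
          | some _ => st.2
          | none =>
            match (l.filter (fun p => decide (r < p.1))).head? with
            | none => st.2
            | some p => (p.1 - r, some p.2))) := by
  intro l
  induction l with
  | nil =>
    intro st _ _ _
    simp only [List.foldl_nil, List.filter_nil, List.getLast?_nil, List.head?_nil]
    cases h2 : st.2.2 <;> simp
  | cons p0 t ih =>
    intro st hpw H2 H3
    rcases List.pairwise_cons.mp hpw with ⟨hx, hpt⟩
    rcases lt_trichotomy p0.1 r with hlt | heq | hgt
    · -- p0 is below r: the above-state always updates
      have hda : |r - p0.1| < st.1.1 := H2 p0 (List.mem_cons_self) hlt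
      have habs : |r - p0.1| = r - p0.1 := abs_of_nonneg (by omega)
      have hstep : pvA_scanStep r st p0 = ((r - p0.1, some p0.2), st.2) := by
        simp only [pvA_scanStep]
        rw [if_pos ⟨hlt, hda⟩, habs]
      have H2' : ∀ p ∈ t, p.1 < r → |r - p.1| < ((r - p0.1, some p0.2), st.2).1.1 := by
        intro p hp hpr
        have := hx p hp
        have h1 : |r - p.1| = r - p.1 := abs_of_nonneg (by omega)
        simp only [h1]
        omega
      have H3' : (((r - p0.1, some p0.2), st.2).2.2 = none ∧
            ∀ p ∈ t, r < p.1 → |r - p.1| < ((r - p0.1, some p0.2), st.2).2.1) ∨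
          (((r - p0.1, some p0.2), st.2).2.2 ≠ none ∧
            ∀ p ∈ t, r < p.1 → ¬ (|r - p.1| < ((r - p0.1, some p0.2), st.2).2.1)) := by
        rcases H3 with ⟨h1, h2⟩ | ⟨h1, h2⟩
        · exact Or.inl ⟨h1, fun p hp hpr => h2 p (List.mem_cons_of_mem _ hp) hpr⟩
        · exact Or.inr ⟨h1, fun p hp hpr => h2 p (List.mem_cons_of_mem _ hp) hpr⟩
      rw [List.foldl_cons, hstep, ih _ hpt H2' H3']
      have hf1 : (p0 :: t).filter (fun p => decide (p.1 < r))
          = p0 :: t.filter (fun p => decide (p.1 < r)) := by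
        simp [List.filter_cons, hlt]
      have hf2 : (p0 :: t).filter (fun p => decide (r < p.1))
          = t.filter (fun p => decide (r < p.1)) := by
        simp only [List.filter_cons, decide_eq_true_eq]
        rw [if_neg (by omega)]
      rw [hf1, hf2]
      cases hft : t.filter (fun p => decide (p.1 < r)) with
      | nil => simp
      | cons q fl' =>
        rw [List.getLast?_cons_cons]
        obtain ⟨y, hy⟩ := Option.isSome_iff_exists.mp
          (show (q :: fl').getLast?.isSome by simp)
        rw [hy]
    · -- p0 is exactly at r: no state change, filters skip it
      have hstep : pvA_scanStep r st p0 = st := by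
        simp only [pvA_scanStep]
        rw [if_neg (by omega), if_neg (by omega)]
      have H2' : ∀ p ∈ t, p.1 < r → |r - p.1| < st.1.1 :=
        fun p hp hpr => H2 p (List.mem_cons_of_mem _ hp) hpr
      have H3' : (st.2.2 = none ∧ ∀ p ∈ t, r < p.1 → |r - p.1| < st.2.1) ∨
          (st.2.2 ≠ none ∧ ∀ p ∈ t, r < p.1 → ¬ (|r - p.1| < st.2.1)) := by
        rcases H3 with ⟨h1, h2⟩ | ⟨h1, h2⟩
        · exact Or.inl ⟨h1, fun p hp hpr => h2 p (List.mem_cons_of_mem _ hp) hpr⟩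
        · exact Or.inr ⟨h1, fun p hp hpr => h2 p (List.mem_cons_of_mem _ hp) hpr⟩
      have hf1 : (p0 :: t).filter (fun p => decide (p.1 < r))
          = t.filter (fun p => decide (p.1 < r)) := by
        simp only [List.filter_cons, decide_eq_true_eq]
        rw [if_neg (by omega)]
      have hf2 : (p0 :: t).filter (fun p => decide (r < p.1))
          = t.filter (fun p => decide (r < p.1)) := by
        simp only [List.filter_cons, decide_eq_true_eq]
        rw [if_neg (by omega)]
      rw [List.foldl_cons, hstep, ih _ hpt H2' H3', hf1, hf2]
    · -- p0 is above r
      have habs : |r - p0.1| = p0.1 - r := by rw [abs_sub_comm]; exact abs_of_nonneg (by omega)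
      have hf1 : (p0 :: t).filter (fun p => decide (p.1 < r))
          = t.filter (fun p => decide (p.1 < r)) := by
        simp only [List.filter_cons, decide_eq_true_eq]
        rw [if_neg (by omega)]
      have hft1 : t.filter (fun p => decide (p.1 < r)) = [] := by
        apply List.filter_eq_nil_iff.mpr
        intro p hp
        have := hx p hp
        simp only [decide_eq_true_eq]
        omega
      have hf2 : (p0 :: t).filter (fun p => decide (r < p.1))
          = p0 :: t.filter (fun p => decide (r < p.1)) := by
        simp [List.filter_cons, hgt]
      rcases H3 with ⟨h1, h2⟩ | ⟨h1, h2⟩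
      · -- open below: p0 locks it
        have hdb : |r - p0.1| < st.2.1 := h2 p0 (List.mem_cons_self) hgt
        have hstep : pvA_scanStep r st p0 = (st.1, (p0.1 - r, some p0.2)) := by
          simp only [pvA_scanStep]
          rw [if_neg (by omega), if_pos ⟨hgt, hdb⟩, habs]
        have H2' : ∀ p ∈ t, p.1 < r → |r - p.1| < (st.1, (p0.1 - r, some p0.2)).1.1 := by
          intro p hp hpr
          have := hx p hp
          omega
        have H3' : ((st.1, (p0.1 - r, some p0.2)).2.2 = none ∧
              ∀ p ∈ t, r < p.1 → |r - p.1| < (st.1, (p0.1 - r, some p0.2)).2.1) ∨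
            ((st.1, (p0.1 - r, some p0.2)).2.2 ≠ none ∧
              ∀ p ∈ t, r < p.1 → ¬ (|r - p.1| < (st.1, (p0.1 - r, some p0.2)).2.1)) := by
          refine Or.inr ⟨by simp, ?_⟩
          intro p hp hpr
          have := hx p hp
          have h4 : |r - p.1| = p.1 - r := by rw [abs_sub_comm]; exact abs_of_nonneg (by omega)
          simp only [h4]
          omega
        rw [List.foldl_cons, hstep, ih _ hpt H2' H3', hf1, hft1, hf2, h1]
        simp [hft1]
      · -- below already locked: nothing changes
        have hdb : ¬ (|r - p0.1| < st.2.1) := h2 p0 (List.mem_cons_self) hgt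
        have hstep : pvA_scanStep r st p0 = st := by
          simp only [pvA_scanStep]
          rw [if_neg (by omega), if_neg (by tauto)]
        have H2' : ∀ p ∈ t, p.1 < r → |r - p.1| < st.1.1 :=
          fun p hp hpr => H2 p (List.mem_cons_of_mem _ hp) hpr
        have H3' : (st.2.2 = none ∧ ∀ p ∈ t, r < p.1 → |r - p.1| < st.2.1) ∨
            (st.2.2 ≠ none ∧ ∀ p ∈ t, r < p.1 → ¬ (|r - p.1| < st.2.1)) :=
          Or.inr ⟨h1, fun p hp hpr => h2 p (List.mem_cons_of_mem _ hp) hpr⟩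
        rw [List.foldl_cons, hstep, ih _ hpt H2' H3', hf1, hf2]
        rcases Option.ne_none_iff_exists'.mp h1 with ⟨v, hv⟩
        rw [hv]

-- ---- phase 4: row building on A's side ----

lemma pv_fillRow (fill : Int) :
    ∀ (n : Nat) (row : List Int), n ≤ row.length →
      (PySem.List.pyRange 0 (n : Int) 1).foldl (fun row c => PySem.List.pySetD row c fill) row
        = List.replicate n fill ++ row.drop n := by
  intro n
  induction n with
  | zero => intro row h; simp [pv_pyRange_nil 0 0 le_rfl]
  | succ m ih =>
    intro row hrow
    have hm : m ≤ row.length := by omega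
    have hcast : ((m + 1 : Nat) : Int) = (m : Int) + 1 := by push_cast; ring
    rw [hcast, PySem.List.pyRange_one_succ_right (by positivity), List.foldl_append,
      ih row hm]
    simp only [List.foldl_cons, List.foldl_nil, PySem.List.pySetD_natCast]
    have hlen : (List.replicate m fill).length = m := List.length_replicate
    rw [List.set_append_right _ _ (by omega)]
    have hdrop : row.drop m = row[m] :: row.drop (m + 1) :=
      (List.getElem_cons_drop (by omega)).symm
    rw [hdrop]
    simp only [hlen, Nat.sub_self, List.set_cons_zero]
    rw [List.replicate_succ' ]
    simp

lemma pv_outBuild (f : Int → List Int → List Int) (z : List Int) :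
    ∀ (n N : Nat), n ≤ N →
      (PySem.List.pyRange 0 (n : Int) 1).foldl
          (fun out r => PySem.List.pySetD out r (f r (PySem.List.pyGetD out r [])))
          (List.replicate N z)
        = ((PySem.List.pyRange 0 (n : Int) 1).map (fun r => f r z)) ++ List.replicate (N - n) z := by
  intro n N
  induction n with
  | zero => intro h; simp [pv_pyRange_nil 0 0 le_rfl]
  | succ m ih =>
    intro hmN
    have hm : m ≤ N := by omega
    have hcast : ((m + 1 : Nat) : Int) = (m : Int) + 1 := by push_cast; ring
    rw [hcast, PySem.List.pyRange_one_succ_right (by positivity), List.foldl_append,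
      ih hm]
    simp only [List.foldl_cons, List.foldl_nil, PySem.List.pySetD_natCast,
      PySem.List.pyGetD_natCast]
    have hlen : ((PySem.List.pyRange 0 (m : Int) 1).map (fun r => f r z)).length = m := by
      rw [List.length_map, PySem.List.pyRange_zero_natCast, List.length_map,
        List.length_range]
    have hrep : List.replicate (N - m) z = z :: List.replicate (N - m - 1) z := by
      obtain ⟨k, hk⟩ : ∃ k, N - m = k + 1 := ⟨N - m - 1, by omega⟩
      rw [hk, List.replicate_succ]; norm_num
    rw [List.getD_append_right _ _ _ _ (by omega), List.set_append_right _ _ (by omega),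
      hlen, Nat.sub_self, hrep, List.getD_cons_zero, List.set_cons_zero,
      List.map_append]
    simp [show N - (m + 1) = N - m - 1 by omega]

def pv_rowValA (separators : List (Int × Int)) (h w ci colc inter r : Int)
    (old : List Int) : List Int :=
  if separators.any (fun p => p.1 == r) then
    PySem.List.pySetD ((PySem.List.pyRange 0 w 1).foldl
      (fun row c => PySem.List.pySetD row c inter) old) ci colc
  else
    let scan := separators.foldl (pvA_scanStep r) ((h + 1, none), (h + 1, none))
    let fill : Int := match scan.1.2, scan.2.2 with
      | none, none => 0
      | none, some cb => cb
      | some ca, none => ca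
      | some ca, some cb =>
        if scan.1.1 < scan.2.1 then ca
        else if scan.2.1 < scan.1.1 then cb
        else if ca = cb then ca
        else inter
    PySem.List.pySetD ((PySem.List.pyRange 0 w 1).foldl
      (fun row c => PySem.List.pySetD row c fill) old) ci inter

lemma pv_rowA_push (separators : List (Int × Int)) (h w ci colc inter : Int)
    (out : List (List Int)) (r : Int) :
    pvA_rowStep separators h w ci colc inter out r
      = PySem.List.pySetD out r
          (pv_rowValA separators h w ci colc inter r (PySem.List.pyGetD out r [])) := by
  simp only [pvA_rowStep, pv_rowValA]
  by_cases hs : separators.any (fun p => p.1 == r) = true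
  · rw [if_pos hs, if_pos hs]
  · rw [if_neg hs, if_neg hs]

lemma pv_fillRow_rep (fill W : Int) (hW : 0 ≤ W) :
    (PySem.List.pyRange 0 W 1).foldl (fun row c => PySem.List.pySetD row c fill)
        (List.replicate W.toNat 0)
      = PySem.List.pyRepeat [fill] W := by
  obtain ⟨m, rfl⟩ : ∃ m : Nat, W = (m : Int) := ⟨W.toNat, (Int.toNat_of_nonneg hW).symm⟩
  rw [PySem.List.pyRepeat_singleton, show ((m : Int)).toNat = m by omega,
    pv_fillRow fill m (List.replicate m 0) (le_of_eq (List.length_replicate).symm)]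
  simp

-- ---- phase 5: the canonical row value and B's segments ----

-- F: the value row r takes, expressed through A's row builder on a zero row.
def pvF (S : List (Int × Int)) (h w ci colc inter r : Int) : List Int :=
  pv_rowValA S h w ci colc inter r (List.replicate w.toNat 0)

lemma pv_F_sep (S : List (Int × Int)) (h W ci colc inter : Int) (hW : 0 ≤ W)
    (s : Int × Int) (hs : s ∈ S) :
    pvF S h W ci colc inter s.1
      = PySem.List.pySetD (PySem.List.pyRepeat [inter] W) ci colc := by
  have hany : S.any (fun p => p.1 == s.1) = true :=
    List.any_eq_true.mpr ⟨s, hs, by simp⟩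
  simp only [pvF, pv_rowValA, hany, if_pos]
  rw [pv_fillRow_rep inter W hW]

lemma pv_F_gap (S pre suf : List (Int × Int)) (h W ci colc inter : Int) (hW : 0 ≤ W)
    (hpw : S.Pairwise (fun p q => p.1 < q.1)) (hsplit : S = pre ++ suf)
    (hbound : ∀ p ∈ S, 0 ≤ p.1 ∧ p.1 < h) (r : Int) (hr0 : 0 ≤ r) (hrh : r < h)
    (hpre : ∀ p ∈ pre, p.1 < r) (hsuf : ∀ q ∈ suf, r < q.1) :
    pvF S h W ci colc inter r
      = pvB_plain W ci inter (pvB_pick inter r pre.getLast? suf.head?) := by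
  have hnotsep : S.any (fun p => p.1 == r) = false := by
    apply List.any_eq_false.mpr
    intro p hp
    rw [hsplit] at hp
    rcases List.mem_append.mp hp with h | h
    · have := hpre p h; simp; omega
    · have := hsuf p h; simp; omega
  have hfa : S.filter (fun p => decide (p.1 < r)) = pre := by
    rw [hsplit, List.filter_append,
      List.filter_eq_self.mpr (fun p hp => by simpa using hpre p hp),
      List.filter_eq_nil_iff.mpr (fun p hp => by have := hsuf p hp; simp; omega),
      List.append_nil]
  have hfb : S.filter (fun p => decide (r < p.1)) = suf := by
    rw [hsplit, List.filter_append,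
      List.filter_eq_nil_iff.mpr (fun p hp => by have := hpre p hp; simp; omega),
      List.filter_eq_self.mpr (fun p hp => by simpa using hsuf p hp),
      List.nil_append]
  have hscan := pv_scanA r h S ((h + 1, none), (h + 1, none)) hpw
    (by
      intro p hp _
      have := hbound p hp
      show |r - p.1| < h + 1
      exact abs_lt.mpr ⟨by omega, by omega⟩)
    (Or.inl ⟨rfl, by
      intro p hp _
      have := hbound p hp
      show |r - p.1| < h + 1
      exact abs_lt.mpr ⟨by omega, by omega⟩⟩)
  simp only [pvF, pv_rowValA, hnotsep, Bool.false_eq_true, if_false, hscan, hfa, hfb]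
  cases hla : pre.getLast? with
  | none =>
    cases hhd : suf.head? with
    | none => rw [pv_fillRow_rep _ W hW]; rfl
    | some q => rw [pv_fillRow_rep _ W hW]; rfl
  | some p =>
    cases hhd : suf.head? with
    | none => rw [pv_fillRow_rep _ W hW]; rfl
    | some q => rw [pv_fillRow_rep _ W hW]; rfl

lemma pv_zipNexts (s : Int × Int) (t : List (Int × Int)) :
    (s :: t).zip (t.map some ++ [none])
      = (s, t.head?) :: t.zip (t.tail.map some ++ [none]) := by
  cases t with
  | nil => rfl
  | cons q t' => rfl

lemma pv_chain (S : List (Int × Int)) (h W ci colc inter : Int) (hW : 0 ≤ W)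
    (hpw : S.Pairwise (fun p q => p.1 < q.1))
    (hbound : ∀ p ∈ S, 0 ≤ p.1 ∧ p.1 < h) :
    ∀ (t pre : List (Int × Int)) (s : Int × Int), S = pre ++ s :: t →
      ((s :: t).zip (t.map some ++ [none])).foldl (pvB_emitStep h W ci colc inter)
          ((PySem.List.pyRange 0 s.1 1).map (pvF S h W ci colc inter))
        = (PySem.List.pyRange 0 h 1).map (pvF S h W ci colc inter) := by
  intro t
  induction t with
  | nil =>
    intro pre s hsplit
    have hsS : s ∈ S := by rw [hsplit]; simp
    have hsb := hbound s hsS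
    have hcross := (List.pairwise_append.mp (hsplit ▸ hpw)).2.2
    show pvB_emitStep h W ci colc inter
        ((PySem.List.pyRange 0 s.1 1).map (pvF S h W ci colc inter)) (s, none)
      = (PySem.List.pyRange 0 h 1).map (pvF S h W ci colc inter)
    simp only [pvB_emitStep]
    have hsep : PySem.List.pySetD (PySem.List.pyRepeat [inter] W) ci colc
        = pvF S h W ci colc inter s.1 := (pv_F_sep S h W ci colc inter hW s hsS).symm
    have hseg : pvB_segment W ci inter (s.1 + 1) h (some s) none
        = (PySem.List.pyRange (s.1 + 1) h 1).map (pvF S h W ci colc inter) := by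
      simp only [pvB_segment]
      apply List.map_congr_left
      intro r hr
      have hrr := PySem.List.mem_pyRange_one.mp hr
      have hgap := pv_F_gap S (pre ++ [s]) [] h W ci colc inter hW hpw (by simp [hsplit])
        hbound r (by omega) hrr.2
        (by
          intro p hp
          rcases List.mem_append.mp hp with hp | hp
          · have := hcross p hp s List.mem_cons_self
            omega
          · simp at hp
            subst hp
            omega)
        (by simp)
      rw [List.getLast?_concat] at hgap
      exact hgap.symm
    rw [hsep, hseg,
      PySem.List.pyRange_one_append 0 s.1 h hsb.1 (by omega),
      PySem.List.pyRange_one_cons (show s.1 < h by omega), List.map_append, List.map_cons]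
    simp
  | cons s' t' ih =>
    intro pre s hsplit
    have hsS : s ∈ S := by rw [hsplit]; simp
    have hs'S : s' ∈ S := by rw [hsplit]; simp
    have hsb := hbound s hsS
    have hs'b := hbound s' hs'S
    have hsplitparts := List.pairwise_append.mp (hsplit ▸ hpw)
    have hcross := hsplitparts.2.2
    have htailpw := hsplitparts.2.1
    have hss' : s.1 < s'.1 := (List.pairwise_cons.mp htailpw).1 s' List.mem_cons_self
    have ht'gt : ∀ q ∈ t', s'.1 < q.1 :=
      (List.pairwise_cons.mp (List.pairwise_cons.mp htailpw).2).1
    rw [pv_zipNexts, List.foldl_cons]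
    have hstate : pvB_emitStep h W ci colc inter
        ((PySem.List.pyRange 0 s.1 1).map (pvF S h W ci colc inter)) (s, (s' :: t').head?)
        = (PySem.List.pyRange 0 s'.1 1).map (pvF S h W ci colc inter) := by
      simp only [List.head?_cons, pvB_emitStep]
      have hsep : PySem.List.pySetD (PySem.List.pyRepeat [inter] W) ci colc
          = pvF S h W ci colc inter s.1 := (pv_F_sep S h W ci colc inter hW s hsS).symm
      have hseg : pvB_segment W ci inter (s.1 + 1) s'.1 (some s) (some s')
          = (PySem.List.pyRange (s.1 + 1) s'.1 1).map (pvF S h W ci colc inter) := by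
        simp only [pvB_segment]
        apply List.map_congr_left
        intro r hr
        have hrr := PySem.List.mem_pyRange_one.mp hr
        have hgap := pv_F_gap S (pre ++ [s]) (s' :: t') h W ci colc inter hW hpw
          (by simp [hsplit]) hbound r (by omega) (by omega)
          (by
            intro p hp
            rcases List.mem_append.mp hp with hp | hp
            · have := hcross p hp s List.mem_cons_self
              omega
            · simp at hp
              subst hp
              omega)
          (by
            intro q hq
            rcases List.mem_cons.mp hq with hq | hq
            · subst hq; omega
            · have := ht'gt q hq; omega)
        rw [List.getLast?_concat] at hgap
        exact hgap.symm
      rw [hsep, hseg,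
        PySem.List.pyRange_one_append 0 s.1 s'.1 hsb.1 (by omega),
        PySem.List.pyRange_one_cons (show s.1 < s'.1 by omega), List.map_append, List.map_cons]
      simp
    rw [hstate]
    simp only [List.tail_cons]
    exact ih (pre ++ [s]) s' (by simp [hsplit])

-- ===== VERDICT (by name: the statement is the Claim_ definition above) =====
theorem fill_between_separators_spec : Claim_equal_fill_between_separators := by
  intro grid bg _hdom hpre
  show fill_between_separators grid bg = fill_between_separators_alt grid bg
  simp only [fill_between_separators, fill_between_separators_alt, PySem.List.len_eq]
  by_cases h0 : ((grid.length : Int) = 0 ∨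
      (if grid.isEmpty then (0 : Int) else ((PySem.List.pyGetD grid 0 []).length : Int)) = 0)
  · rw [if_pos h0, if_pos h0]
    rfl
  · rw [if_neg h0, if_neg h0]
    have hne : grid ≠ [] := by
      intro hnil
      exact h0 (Or.inl (by simp [hnil]))
    have hWe : (if grid.isEmpty then (0 : Int) else ((PySem.List.pyGetD grid 0 []).length : Int))
        = (((grid.headD []).length : Nat) : Int) := by
      rcases grid with _ | ⟨x, t⟩
      · exact absurd rfl hne
      · simp [PySem.List.pyGetD_zero]
    set n0 : Nat := (grid.headD []).length with hn0
    rw [hWe]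
    -- the two column folds
    rw [pv_zip_eq_range grid hne hpre, ← hn0, pv_enumerate_map_pyRange n0 (pvColF grid),
      List.foldl_map]
    have hhomstep : ∀ (x : Option (Int × Int × Int × Int)) (y : Int),
        pvA_colStep grid bg (grid.length : Int) (pvConv x) y
          = pvConv ((fun s c => pvB_colStep bg s (c, pvColF grid c)) x y) := by
      intro x y
      have := pv_colStep_hom grid bg x y
      rwa [PySem.List.len_eq] at this
    rw [show ((none, 0) : Option (Int × Int × Int) × Int) = pvConv none from rfl,
      List.foldl_hom pvConv hhomstep]
    cases hbf : (PySem.List.pyRange 0 ((n0 : Nat) : Int) 1).foldl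
        (fun s c => pvB_colStep bg s (c, pvColF grid c)) none with
    | none => rfl
    | some quad =>
      obtain ⟨tt, ci, colc, inter⟩ := quad
      show (if (List.foldl (pvA_sepStep grid bg ci inter ((n0 : Nat) : Int)) []
              (PySem.List.pyRange 0 (grid.length : Int) 1)).isEmpty = true
            then pvA_copy grid else _)
          = _
      have hseps := pv_seps_eq grid bg ci inter n0 (fun row hr => hpre row hr)
      simp only [hseps]
      set S := (PySem.List.pyRange 0 (grid.length : Int) 1).foldl
        (pvA_sepStep grid bg ci inter ((n0 : Nat) : Int)) [] with hSdef
      have hSfilter := pv_sepA_filter grid bg ci inter ((n0 : Nat) : Int)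
        (PySem.List.pyRange 0 (grid.length : Int) 1)
      have hpwS : S.Pairwise (fun p q => p.1 < q.1) := by
        rw [hSdef, hSfilter]
        apply List.pairwise_map.mpr
        exact ((pv_range_pairwise grid.length).filter _)
      have hboundS : ∀ p ∈ S, 0 ≤ p.1 ∧ p.1 < (grid.length : Int) := by
        intro p hp
        rw [hSdef, hSfilter] at hp
        rcases List.mem_map.mp hp with ⟨r, hr, hre⟩
        have := PySem.List.mem_pyRange_one.mp (List.mem_of_mem_filter hr)
        subst hre
        simpa using this
      cases hS : S with
      | nil => rfl
      | cons s0 rest =>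
        simp only [List.isEmpty_cons, Bool.false_eq_true, if_false]
        have hW0 : (0 : Int) ≤ ((n0 : Nat) : Int) := by positivity
        -- A's output fold becomes the canonical map
        have hinit : (PySem.List.pyRange 0 (grid.length : Int) 1).map
              (fun _ => PySem.List.pyRepeat ([0] : List Int) ((n0 : Nat) : Int))
            = List.replicate grid.length (List.replicate (((n0 : Nat) : Int)).toNat (0 : Int)) := by
          simp only [PySem.List.pyRepeat_singleton, List.map_const']
          rw [PySem.List.pyRange_zero_natCast, List.length_map, List.length_range]
        have houtA : List.foldl (pvA_rowStep (s0 :: rest) (grid.length : Int)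
              ((n0 : Nat) : Int) ci colc inter)
              ((PySem.List.pyRange 0 (grid.length : Int) 1).map
                (fun _ => PySem.List.pyRepeat [0] ((n0 : Nat) : Int)))
              (PySem.List.pyRange 0 (grid.length : Int) 1)
            = (PySem.List.pyRange 0 (grid.length : Int) 1).map
                (pvF (s0 :: rest) (grid.length : Int) ((n0 : Nat) : Int) ci colc inter) := by
          rw [hinit, PySem.List.foldl_congr_mem _ _
            (fun out r => PySem.List.pySetD out r
              (pv_rowValA (s0 :: rest) (grid.length : Int) ((n0 : Nat) : Int) ci colc inter r
                (PySem.List.pyGetD out r []))) _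
            (fun acc x _ => pv_rowA_push (s0 :: rest) (grid.length : Int) ((n0 : Nat) : Int)
              ci colc inter acc x)]
          have := pv_outBuild (pv_rowValA (s0 :: rest) (grid.length : Int) ((n0 : Nat) : Int)
            ci colc inter) (List.replicate (((n0 : Nat) : Int)).toNat 0)
            grid.length grid.length le_rfl
          simpa [pvF] using this
        rw [houtA]
        -- B's side
        rw [PySem.List.slice_from_one, List.tail_cons]
        have hinitB : pvB_segment ((n0 : Nat) : Int) ci inter 0 s0.1 none (some s0)
            = (PySem.List.pyRange 0 s0.1 1).map
                (pvF (s0 :: rest) (grid.length : Int) ((n0 : Nat) : Int) ci colc inter) := by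
          simp only [pvB_segment]
          apply List.map_congr_left
          intro r hr
          have hrr := PySem.List.mem_pyRange_one.mp hr
          have hs0b := hboundS s0 (by rw [hS]; exact List.mem_cons_self)
          have hgap := pv_F_gap (s0 :: rest) [] (s0 :: rest) (grid.length : Int)
            ((n0 : Nat) : Int) ci colc inter hW0 (hS ▸ hpwS) rfl (hS ▸ hboundS) r hrr.1
            (by omega)
            (by simp)
            (by
              intro q hq
              rcases List.mem_cons.mp hq with hq | hq
              · subst hq; omega
              · have hq' := (hS ▸ hpwS)
                have := (List.pairwise_cons.mp hq').1 q hq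
                omega)
          exact hgap.symm
        rw [hinitB]
        exact pv_chain (s0 :: rest) (grid.length : Int) ((n0 : Nat) : Int) ci colc inter hW0
          (hS ▸ hpwS) (hS ▸ hboundS) rest [] s0 rfl |>.symm
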